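-- pv_equiv track=rewrite | github.com/MOkASiH/Math | Math_4/main.py | check_linearity
-- ===== SOURCE A (Python) =====
-- def check_linearity(tru_table):
--     num_vars = len(tru_table[0]) - 1  # Количество переменных
--     table = [[int(value) for value in row] for row in tru_table]
--
--     # Преобразуем фу000нкцию в вектор значений
--     func_values = [row[-1] for row in table]
--
--     # Если все значения функции одинаковы, она линейная
--     if all(value == func_values[0] for value in func_values):
--         return "+"
--
--     # Проверка линейности через декомпозицию по весовым коэффициентам
--     n = len(func_values)
--     walsh_transform = [0] * n
--
--     # Вычисляем преобразование Уолша-Адамара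
--     for i in range(n):
--         for j in range(n):
--             xor_sum = bin(i & j).count('1') % 2
--             walsh_transform[i] += (-1) ** xor_sum * func_values[j]
--
--     # Линейность: если все значения преобразования Уолша делятся на 2, функция линейна
--     for value in walsh_transform:
--         if value % 2 != 0:
--             return " "  # Функция нелинейная
--
--     return "+"  # Функция линейная
-- ===== SOURCE B (Python) =====
-- def check_linearity(tru_table):
--     vals = [int(row[-1]) for row in tru_table]
--     if all(v == vals[0] for v in vals):
--         return "+"
--     # every Walsh coefficient sum_j (+-1)*f_j has the parity of sum(vals),
--     # so "some coefficient is odd" iff sum(vals) is odd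
--     return "+" if sum(vals) % 2 == 0 else " "
-- ===== Notes on version B (the rewrite author's own statement) =====
-- stated objective: faster
-- what changed: Replaces the O(n^2) Walsh-Hadamard double loop by the observation that every Walsh coefficient is a signed sum of the outputs and so shares the parity of their plain sum; B just sums the last column once.
import Mathlib
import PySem

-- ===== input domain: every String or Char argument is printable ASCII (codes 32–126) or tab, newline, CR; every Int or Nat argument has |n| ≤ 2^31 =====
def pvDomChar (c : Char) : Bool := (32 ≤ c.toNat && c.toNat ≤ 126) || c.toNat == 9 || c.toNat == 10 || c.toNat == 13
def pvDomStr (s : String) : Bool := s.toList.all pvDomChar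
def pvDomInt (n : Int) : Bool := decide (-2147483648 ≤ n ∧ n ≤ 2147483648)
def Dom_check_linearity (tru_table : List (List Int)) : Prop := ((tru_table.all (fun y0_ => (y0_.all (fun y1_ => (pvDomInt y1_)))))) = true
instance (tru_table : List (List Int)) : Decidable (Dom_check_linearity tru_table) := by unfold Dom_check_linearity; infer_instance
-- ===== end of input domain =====

-- ===== PORT A =====
-- B replaces A's O(n^2) Walsh-Hadamard double loop by one parity pass over the last column (same value everywhere A returns).

-- popcount of a natural number: port of bin(x).count('1') for x >= 0 (exact there; both operands come from range(n), so nonnegative)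
def pvBits (n : Nat) : Nat :=
  if h : n = 0 then 0 else n % 2 + pvBits (n / 2)
termination_by n
decreasing_by exact Nat.div_lt_self (Nat.pos_of_ne_zero h) (by omega)

def check_linearity (tru_table : List (List Int)) : String :=
  let _num_vars : Int := ((tru_table.headD []).length : Int) - 1
  let table := tru_table.map (fun row => row.map (fun v => v))
  let func_values := table.map (fun row => (PySem.List.pyGet? row (-1)).getD 0)
  if func_values.all (fun v => v == (PySem.List.pyGet? func_values 0).getD 0) then "+"
  else
    let n : Int := func_values.length
    let walsh := (PySem.List.pyRange 0 n 1).map (fun i =>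
      (PySem.List.pyRange 0 n 1).foldl (fun acc j =>
        let xor_sum : Nat := pvBits (i.toNat &&& j.toNat) % 2
        acc + (-1 : Int) ^ xor_sum * PySem.List.pyGetD func_values j 0) 0)
    if walsh.any (fun v => PySem.Int.mod v 2 != 0) then " " else "+"

-- ===== PORT B =====
def check_linearity_alt (tru_table : List (List Int)) : String :=
  let vals := tru_table.map (fun row => (PySem.List.pyGet? row (-1)).getD 0)
  if vals.all (fun v => v == (PySem.List.pyGet? vals 0).getD 0) then "+"
  else if PySem.Int.mod (vals.foldl (· + ·) 0) 2 == 0 then "+" else " "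

-- ===== PRECONDITION & SPEC =====
-- Pre_ excludes exactly the inputs on which A raises IndexError: an empty table (tru_table[0]) or an empty row (row[-1]).
def Pre_check_linearity (tru_table : List (List Int)) : Prop :=
  tru_table ≠ [] ∧ ∀ row ∈ tru_table, row ≠ []
instance (tru_table : List (List Int)) : Decidable (Pre_check_linearity tru_table) := by unfold Pre_check_linearity; infer_instance
def pvWitness_check_linearity : List (List Int) := [[0, 1], [1, 0]]

def Spec_check_linearity (tru_table : List (List Int)) (out : String) : Prop := out = check_linearity_alt tru_table
instance (tru_table : List (List Int)) (out : String) : Decidable (Spec_check_linearity tru_table out) := by unfold Spec_check_linearity; infer_instance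

-- ===== CLAIM (what is proved, stated in full; the proofs are below) =====
def Claim_equal_check_linearity : Prop := ∀ (tru_table : List (List Int)), Dom_check_linearity tru_table → Pre_check_linearity tru_table → Spec_check_linearity tru_table (check_linearity tru_table)

-- ===== LEMMAS AND PROOFS =====

-- each accumulated signed sum has the parity of the plain sum
theorem pv_fold_parity (c g : Int → Int) (l : List Int)
    (hc : ∀ j ∈ l, c j = 1 ∨ c j = -1) (a : Int) :
    (l.foldl (fun acc j => acc + c j * g j) a) % 2 = (a + (l.map g).sum) % 2 := by
  induction l generalizing a with
  | nil => simp
  | cons j0 l ih =>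
    have h0 := hc j0 (by simp)
    have hrest : ∀ j ∈ l, c j = 1 ∨ c j = -1 := fun j hj => hc j (by simp [hj])
    simp only [List.foldl_cons, List.map_cons, List.sum_cons]
    rw [ih hrest]
    generalize g j0 = G
    generalize (l.map g).sum = S
    rcases h0 with h | h <;> rw [h] <;> omega

theorem pv_any_const {α : Type} (l : List α) (p : α → Bool) (b : Bool)
    (hne : l ≠ []) (h : ∀ x ∈ l, p x = b) : l.any p = b := by
  cases l with
  | nil => exact absurd rfl hne
  | cons x xs =>
    cases b with
    | true => simp [List.any_cons, h x (by simp)]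
    | false =>
      simp only [List.any_cons, h x (by simp), Bool.false_or]
      exact List.any_eq_false.mpr (fun y hy => by simpa using h y (by simp [hy]))

theorem pv_sign_cases (k : Nat) : (-1 : Int) ^ k = 1 ∨ (-1 : Int) ^ k = -1 := by
  rcases Nat.even_or_odd k with h | h
  · exact Or.inl h.neg_one_pow
  · exact Or.inr h.neg_one_pow

theorem check_linearity_spec : Claim_equal_check_linearity := by
  intro tt _hdom hpre
  obtain ⟨hne, _hrows⟩ := hpre
  unfold Spec_check_linearity check_linearity check_linearity_alt
  simp only [List.map_map, Function.comp_def]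
  have hmapid : (tt.map (fun row => (PySem.List.pyGet? (row.map (fun v => v)) (-1)).getD 0))
      = tt.map (fun row => (PySem.List.pyGet? row (-1)).getD 0) := by
    simp [List.map_id']
  rw [hmapid]
  set vals := tt.map (fun row => (PySem.List.pyGet? row (-1)).getD 0) with hvals
  have hvne : vals ≠ [] := by
    simpa [hvals] using hne
  split
  · rfl
  · -- parity of every walsh entry = parity of vals.sum
    have hentry : ∀ i : Int,
        ((PySem.List.pyRange 0 (vals.length : Int) 1).foldl (fun acc j =>
          acc + (-1 : Int) ^ (pvBits (i.toNat &&& j.toNat) % 2) * PySem.List.pyGetD vals j 0) 0) % 2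
        = vals.sum % 2 := by
      intro i
      have := pv_fold_parity (fun j => (-1 : Int) ^ (pvBits (i.toNat &&& j.toNat) % 2))
        (fun j => PySem.List.pyGetD vals j 0) (PySem.List.pyRange 0 (vals.length : Int) 1)
        (fun j _ => pv_sign_cases _) 0
      rw [this, PySem.List.map_pyGetD_pyRange_zero']
      ring_nf
    have hsum : vals.foldl (· + ·) 0 = vals.sum := by
      simp [List.sum_eq_foldl]
    have hany : ((PySem.List.pyRange 0 (vals.length : Int) 1).map (fun i =>
        (PySem.List.pyRange 0 (vals.length : Int) 1).foldl (fun acc j =>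
          acc + (-1 : Int) ^ (pvBits (i.toNat &&& j.toNat) % 2) * PySem.List.pyGetD vals j 0) 0)).any
        (fun v => PySem.Int.mod v 2 != 0) = (PySem.Int.mod vals.sum 2 != 0) := by
      rw [List.any_map]
      have hlen : 0 < vals.length := List.length_pos_iff.mpr hvne
      apply pv_any_const
      · have : (PySem.List.pyRange 0 (vals.length : Int) 1).length = vals.length := by
          rw [PySem.List.length_pyRange_one]; omega
        intro hnil
        rw [hnil] at this
        simp at this
        omega
      · intro i _
        simp only [Function.comp]
        rw [PySem.Int.mod_eq_emod_of_pos (by omega), PySem.Int.mod_eq_emod_of_pos (by omega),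
          hentry i]
    rw [hany, hsum]
    simp only [PySem.Int.mod_eq_emod_of_pos (by omega : (0:Int) < 2)]
    rcases Int.emod_two_eq vals.sum with h | h <;> simp [h]
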